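-- pv_equiv track=rewrite | github.com/ad-freiburg/tokenization-repair | scripts/benchmark_error_tolerant.py | remove_additional_chars
-- ===== SOURCE A (Python) =====
-- def remove_additional_chars(sequence: str, correct: str):
--     processed = ""
--     keep_chars = correct.replace(' ', '')
--     keep_i = 0
--     for char in sequence:
--         if keep_i < len(keep_chars) and char == keep_chars[keep_i]:
--             processed += char
--             keep_i += 1
--         elif char == ' ' and not processed.endswith(' '):
--             processed += char
--     return processed.strip()
-- ===== SOURCE B (Python) =====
-- def remove_additional_chars(sequence: str, correct: str):
--     # Pass 1: greedy subsequence match driven by str.find — for each char of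
--     # keep_chars, jump to its next occurrence in sequence; stop when absent.
--     keep_chars = correct.replace(' ', '')
--     matches = []  # (position, char) of the greedily matched subsequence
--     start = 0
--     for kc in keep_chars:
--         p = sequence.find(kc, start)
--         if p == -1:
--             break
--         matches.append((p, kc))
--         start = p + 1
--     # Pass 2: emit matched chars, with one space between neighbours whose gap
--     # in sequence contained a space; strip handles boundary whitespace.
--     out = []
--     prev = None
--     for p, c in matches:
--         if prev is not None and ' ' in sequence[prev + 1:p]:
--             out.append(' ')
--         out.append(c)
--         prev = p
--     return ''.join(out).strip()
-- ===== Notes on version B (the rewrite author's own statement) =====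
-- stated objective: alternative
-- what changed: B replaces A's single char-by-char scan with inline space dedup by a find-driven pass: it loops over keep_chars jumping with str.find to each next matching position, then a second pass emits the matched chars with one space between neighbours whose gap contained a space, relying on strip for the boundaries.
import Mathlib
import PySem

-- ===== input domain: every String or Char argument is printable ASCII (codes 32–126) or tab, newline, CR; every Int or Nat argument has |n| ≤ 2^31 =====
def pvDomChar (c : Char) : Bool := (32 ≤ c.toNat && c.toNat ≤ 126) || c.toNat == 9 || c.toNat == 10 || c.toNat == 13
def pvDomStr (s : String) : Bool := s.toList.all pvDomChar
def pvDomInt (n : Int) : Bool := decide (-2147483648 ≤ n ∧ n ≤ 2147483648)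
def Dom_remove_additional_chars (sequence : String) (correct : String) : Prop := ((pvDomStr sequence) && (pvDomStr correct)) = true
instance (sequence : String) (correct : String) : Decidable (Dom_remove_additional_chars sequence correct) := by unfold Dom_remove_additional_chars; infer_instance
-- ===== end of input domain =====

-- B replaces A's single scan with inline space dedup by a two-pass find-driven
-- algorithm (jump to each matched position with str.find, then emit the matched
-- chars with gap-based separators): alternative decomposition, same cost.

-- ===== PORT A =====
-- one loop step of A: state = (processed, keep_i)
def pvStepA (keep : List Char) (st : List Char × Nat) (ch : Char) : List Char × Nat :=
  if st.2 < keep.length && ch == keep.getD st.2 ' ' then (st.1 ++ [ch], st.2 + 1)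
  else if ch == ' ' && !(st.1.getLast? == some ' ') then (st.1 ++ [ch], st.2)
  else st

def remove_additional_chars (sequence : String) (correct : String) : String :=
  -- correct.replace(' ', '') = drop every space character
  let keep_chars := correct.toList.filter (fun c => c != ' ')
  let st := sequence.toList.foldl (pvStepA keep_chars) ([], 0)
  PySem.Str.strip (String.ofList st.1)

-- ===== PORT B =====
-- pass 1 of Source B: for kc in keep_chars: p = sequence.find(kc, start); break on -1
def pvMatches (seq : List Char) : List Char → Nat → List (Nat × Char)
  | [], _ => []
  | kc :: rest, start =>
    if PySem.Chars.findFrom seq [kc] (start : Int) none = -1 then []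
    else ((PySem.Chars.findFrom seq [kc] (start : Int) none).toNat, kc) ::
      pvMatches seq rest ((PySem.Chars.findFrom seq [kc] (start : Int) none).toNat + 1)

-- pass 2 of Source B: emit chars, with ' ' between neighbours with ' ' in sequence[prev+1:p]
def pvEmit (seq : List Char) : Option Nat → List (Nat × Char) → List Char
  | _, [] => []
  | prev, (p, c) :: ms =>
    (match prev with
     | some q =>
       if PySem.Chars.isIn [' '] (PySem.List.slice seq (some ((q + 1 : Nat) : Int)) (some ((p : Nat) : Int)))
       then [' '] else []
     | none => []) ++ c :: pvEmit seq (some p) ms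

def remove_additional_chars_alt (sequence : String) (correct : String) : String :=
  let keep_chars := correct.toList.filter (fun c => c != ' ')
  let ms := pvMatches sequence.toList keep_chars 0
  PySem.Str.strip (String.ofList (pvEmit sequence.toList none ms))

-- ===== PRECONDITION & SPEC =====
def Spec_remove_additional_chars (sequence : String) (correct : String) (out : String) : Prop := out = remove_additional_chars_alt sequence correct
instance (sequence : String) (correct : String) (out : String) : Decidable (Spec_remove_additional_chars sequence correct out) := by unfold Spec_remove_additional_chars; infer_instance

-- ===== CLAIM (what is proved, stated in full; the proofs are below) =====
def Claim_equal_remove_additional_chars : Prop := ∀ (sequence : String) (correct : String), Dom_remove_additional_chars sequence correct → Spec_remove_additional_chars sequence correct (remove_additional_chars sequence correct)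

-- ===== LEMMAS AND PROOFS =====

-- [' '] if the block contains a space, else []
def pvLead (x : List Char) : List Char := if ' ' ∈ x then [' '] else []

-- reference shape shared by both proofs: the matched chars, each preceded by the
-- pvLead block of the gap before it, plus one trailing pvLead for the remainder
def pvSpec : List Char → List Char → List Char
  | [], s => pvLead s
  | kc :: rest, s =>
    if (s.takeWhile (fun c => decide (c ≠ kc))).length = s.length then pvLead s
    else pvLead (s.takeWhile (fun c => decide (c ≠ kc))) ++
      kc :: pvSpec rest (s.drop ((s.takeWhile (fun c => decide (c ≠ kc))).length + 1))

theorem pvEmit_cons_some (seq : List Char) (q p : Nat) (c : Char) (ms : List (Nat × Char)) :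
    pvEmit seq (some q) ((p, c) :: ms) =
      (if PySem.Chars.isIn [' '] (PySem.List.slice seq (some ((q + 1 : Nat) : Int)) (some ((p : Nat) : Int)))
       then [' '] else []) ++ c :: pvEmit seq (some p) ms := rfl

theorem pvEmit_cons_none (seq : List Char) (p : Nat) (c : Char) (ms : List (Nat × Char)) :
    pvEmit seq none ((p, c) :: ms) = c :: pvEmit seq (some p) ms := rfl

theorem pv_drop_split (u v : List Char) (kc : Char) :
    (u ++ kc :: v).drop (u.length + 1) = v := by
  rw [← List.drop_drop]
  rw [List.drop_left]
  simp

theorem pv_dropWhile_head (p : Char → Bool) : ∀ (l : List Char) (x : Char) (xs : List Char),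
    l.dropWhile p = x :: xs → p x = false := by
  intro l
  induction l with
  | nil => intro x xs h; simp [List.dropWhile] at h
  | cons c t ih =>
    intro x xs h
    by_cases hc : p c = true
    · exact ih x xs (by simpa [List.dropWhile_cons, hc] using h)
    · rw [List.dropWhile_cons, if_neg hc] at h
      cases h
      simpa using hc

-- A's fold over a block with no matching char appends at most one space
theorem pv_foldA_nomatch (keep : List Char) : ∀ (a pr : List Char),
    (∀ c ∈ a, ¬(0 < keep.length ∧ c = keep.getD 0 ' ')) →
    a.foldl (pvStepA keep) (pr, 0) =
      (pr ++ (if ' ' ∈ a ∧ ¬ pr.getLast? = some ' ' then [' '] else []), 0) := by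
  intro a
  induction a with
  | nil => intro pr h; simp
  | cons c rest ih =>
    intro pr h
    have hc := h c List.mem_cons_self
    have hrest : ∀ c ∈ rest, ¬(0 < keep.length ∧ c = keep.getD 0 ' ') :=
      fun c hm => h c (List.mem_cons_of_mem _ hm)
    rw [List.foldl_cons]
    by_cases hcsp : c = ' '
    · by_cases hl : pr.getLast? = some ' '
      · have hstep : pvStepA keep (pr, 0) c = (pr, 0) := by
          unfold pvStepA
          rw [if_neg (by simpa [decide_eq_true_iff] using hc)]
          simp [hcsp, hl]
        rw [hstep, ih pr hrest]
        simp [hcsp, hl]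
      · have hstep : pvStepA keep (pr, 0) c = (pr ++ [' '], 0) := by
          unfold pvStepA
          rw [if_neg (by simpa [decide_eq_true_iff] using hc)]
          simp [hcsp, hl]
        rw [hstep, ih _ hrest]
        simp [hcsp, hl]
    · have hstep : pvStepA keep (pr, 0) c = (pr, 0) := by
        unfold pvStepA
        rw [if_neg (by simpa [decide_eq_true_iff] using hc)]
        simp [hcsp]
      rw [hstep, ih pr hrest]
      have hc2 : ¬ (' ' = c) := fun hh => hcsp hh.symm
      simp [List.mem_cons, hc2]

-- A's fold from index ki = A's fold with the matched prefix of keep dropped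
theorem pv_shiftA : ∀ (xs : List Char) (keep pr : List Char) (ki : Nat),
    xs.foldl (pvStepA keep) (pr, ki) =
      ((xs.foldl (pvStepA (keep.drop ki)) (pr, 0)).1,
        ki + (xs.foldl (pvStepA (keep.drop ki)) (pr, 0)).2) := by
  intro xs
  induction xs with
  | nil => intro keep pr ki; simp
  | cons ch rest ih =>
    intro keep pr ki
    rw [List.foldl_cons, List.foldl_cons]
    by_cases h1 : ki < keep.length ∧ ch = keep.getD ki ' '
    · have hgetD : keep.getD ki ' ' = (keep.drop ki).getD 0 ' ' := by
        simp [List.getD_eq_getElem?_getD, List.getElem?_drop]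
      have e1 : pvStepA keep (pr, ki) ch = (pr ++ [ch], ki + 1) := by
        unfold pvStepA
        rw [if_pos (by simp [h1.2] <;> exact h1.1)]
      have e2 : pvStepA (keep.drop ki) (pr, 0) ch = (pr ++ [ch], 1) := by
        unfold pvStepA
        rw [if_pos (by simp [h1.2, ← hgetD] <;> exact h1.1)]
      rw [e1, e2, ih keep (pr ++ [ch]) (ki + 1), ih (keep.drop ki) (pr ++ [ch]) 1]
      have hd : (keep.drop ki).drop 1 = keep.drop (ki + 1) := by
        rw [List.drop_drop]
      rw [hd]
      simp only [Prod.mk.injEq]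
      exact ⟨trivial, by omega⟩
    · have e1 : pvStepA keep (pr, ki) ch =
          (if ch = ' ' ∧ ¬ pr.getLast? = some ' ' then (pr ++ [' '], ki) else (pr, ki)) := by
        unfold pvStepA
        rw [if_neg (by simpa [decide_eq_true_iff] using h1)]
        by_cases hcsp : ch = ' ' <;> by_cases hl : pr.getLast? = some ' ' <;>
          simp [hcsp, hl]
      have h2 : ¬(0 < (keep.drop ki).length ∧ ch = (keep.drop ki).getD 0 ' ') := by
        intro ⟨ha, hb⟩
        apply h1
        have hki : ki < keep.length := by simp [List.length_drop] at ha; omega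
        exact ⟨hki, by rw [hb]; simp [List.getD_eq_getElem?_getD, List.getElem?_drop]⟩
      have e2 : pvStepA (keep.drop ki) (pr, 0) ch =
          (if ch = ' ' ∧ ¬ pr.getLast? = some ' ' then (pr ++ [' '], 0) else (pr, 0)) := by
        unfold pvStepA
        rw [if_neg (by simpa [decide_eq_true_iff] using h2)]
        by_cases hcsp : ch = ' ' <;> by_cases hl : pr.getLast? = some ' ' <;>
          simp [hcsp, hl]
      rw [e1, e2]
      by_cases hcond : ch = ' ' ∧ ¬ pr.getLast? = some ' '
      · rw [if_pos hcond, if_pos hcond, ih keep (pr ++ [' ']) ki]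
      · rw [if_neg hcond, if_neg hcond, ih keep pr ki]

-- A's fold produces pvSpec
theorem pv_foldA_spec : ∀ (keep : List Char), ' ' ∉ keep →
    ∀ (s pr : List Char), ¬ pr.getLast? = some ' ' →
      (s.foldl (pvStepA keep) (pr, 0)).1 = pr ++ pvSpec keep s := by
  intro keep
  induction keep with
  | nil =>
    intro _ s pr hpr
    rw [pv_foldA_nomatch [] s pr (by simp)]
    simp [pvSpec, pvLead, hpr]
  | cons kc rest ih =>
    intro hk s pr hpr
    have hk' : ' ' ∉ rest := fun h => hk (List.mem_cons_of_mem _ h)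
    have hkc : kc ≠ ' ' := fun h => hk (h ▸ List.mem_cons_self)
    by_cases hfound : (s.takeWhile (fun c => decide (c ≠ kc))).length = s.length
    · -- kc not in s: no match ever fires
      have hself : s.takeWhile (fun c => decide (c ≠ kc)) = s :=
        (List.takeWhile_prefix _).eq_of_length hfound
      have hnm : ∀ c ∈ s, ¬(0 < (kc :: rest).length ∧ c = (kc :: rest).getD 0 ' ') := by
        intro c hm hand
        have h5 := List.mem_takeWhile_imp (hself.symm ▸ hm)
        have hcnkc : c ≠ kc := by simpa using h5
        exact hcnkc (by simpa using hand.2)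
      rw [pv_foldA_nomatch (kc :: rest) s pr hnm]
      rw [pvSpec, if_pos hfound]
      simp [pvLead, hpr]
    · -- kc ∈ s: split s = a ++ kc :: xs
      set a := s.takeWhile (fun c => decide (c ≠ kc)) with ha
      cases hdw : s.dropWhile (fun c => decide (c ≠ kc)) with
      | nil =>
        exfalso
        have h2 : a ++ s.dropWhile (fun c => decide (c ≠ kc)) = s := by
          rw [ha]; exact List.takeWhile_append_dropWhile
        rw [hdw, List.append_nil] at h2
        exact hfound (by rw [← h2])
      | cons x xs =>
        have hx : x = kc := by simpa using pv_dropWhile_head _ s x xs hdw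
        have hsplit : s = a ++ kc :: xs := by
          conv_lhs => rw [← List.takeWhile_append_dropWhile (p := fun c => decide (c ≠ kc)) (l := s)]
          rw [hdw, hx, ← ha]
        have hbdrop : s.drop (a.length + 1) = xs := by
          have h3 := pv_drop_split a xs kc
          rw [← hsplit] at h3
          exact h3
        conv_lhs => rw [hsplit]
        rw [List.foldl_append, List.foldl_cons]
        have hnma : ∀ c ∈ a, ¬(0 < (kc :: rest).length ∧ c = (kc :: rest).getD 0 ' ') := by
          intro c hm hand
          have h5 := List.mem_takeWhile_imp (ha ▸ hm)
          have hcnkc : c ≠ kc := by simpa using h5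
          exact hcnkc (by simpa using hand.2)
        rw [pv_foldA_nomatch (kc :: rest) a pr hnma]
        have hprlead : (pr ++ (if ' ' ∈ a ∧ ¬ pr.getLast? = some ' ' then [' '] else [])) =
            pr ++ pvLead a := by
          simp [pvLead, hpr]
        rw [hprlead]
        have hstep : pvStepA (kc :: rest) (pr ++ pvLead a, 0) kc =
            (pr ++ pvLead a ++ [kc], 1) := by
          unfold pvStepA
          rw [if_pos (by simp)]
        rw [hstep, pv_shiftA xs (kc :: rest) (pr ++ pvLead a ++ [kc]) 1]
        simp only [List.drop_succ_cons, List.drop_zero]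
        rw [ih hk' xs (pr ++ pvLead a ++ [kc]) (by simp [hkc])]
        rw [pvSpec, if_neg (by rw [← ha]; exact hfound)]
        rw [← ha, hbdrop]
        simp

theorem pv_singleton_prefix (x : Char) (m : List Char) : ([x] <+: m) ↔ m.head? = some x := by
  cases m with
  | nil => simp
  | cons c t => simp [List.cons_prefix_cons, eq_comm]

theorem pv_singleton_infix (x : Char) (l : List Char) : ([x] <:+: l) ↔ x ∈ l := by
  constructor
  · intro h
    exact List.singleton_sublist.mp h.sublist
  · intro h
    obtain ⟨s, t, rfl⟩ := List.append_of_mem h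
    exact ⟨s, t, by simp⟩

theorem pv_takeWhile_len (kc : Char) : ∀ (l : List Char) (n : Nat), l[n]? = some kc →
    (∀ i, i < n → l[i]? ≠ some kc) →
    (l.takeWhile (fun c => decide (c ≠ kc))).length = n := by
  intro l
  induction l with
  | nil => intro n h _; simp at h
  | cons c t ih =>
    intro n h hmin
    cases n with
    | zero =>
      simp at h
      simp [List.takeWhile_cons, h]
    | succ n =>
      have hc : c ≠ kc := by
        intro hceq
        exact hmin 0 (Nat.succ_pos _) (by simp [hceq])
      rw [List.takeWhile_cons, if_pos (by simpa using hc)]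
      simp only [List.length_cons]
      have := ih n (by simpa using h) (fun i hi => by
        have := hmin (i + 1) (by omega)
        simpa using this)
      omega

-- characterisation of the port's findFrom call for a single char
theorem pv_find_char (seq : List Char) (kc : Char) (start : Nat) (hs : start ≤ seq.length) :
    (PySem.Chars.findFrom seq [kc] (start : Int) none = -1 ↔ kc ∉ seq.drop start) ∧
    (PySem.Chars.findFrom seq [kc] (start : Int) none ≠ -1 →
      (PySem.Chars.findFrom seq [kc] (start : Int) none).toNat =
        start + ((seq.drop start).takeWhile (fun c => decide (c ≠ kc))).length) := by
  have hM := PySem.Chars.findFrom_natCast seq [kc] start hs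
  have h0 : PySem.Chars.findFrom (seq.drop start) [kc] ((0 : Nat) : Int) none =
      PySem.Chars.find (seq.drop start) [kc] := by
    rw [Nat.cast_zero]
    exact PySem.Chars.findFrom_zero (seq.drop start) [kc]
  have hneg : PySem.Chars.find (seq.drop start) [kc] = -1 ↔ kc ∉ seq.drop start := by
    rw [← h0]
    rw [PySem.Chars.findFrom_natCast_eq_neg_one_iff (seq.drop start) [kc] 0 (Nat.zero_le _)]
    simp [pv_singleton_infix]
  have spec0 : PySem.Chars.find (seq.drop start) [kc] ≠ -1 →
      0 ≤ PySem.Chars.find (seq.drop start) [kc] ∧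
      [kc] <+: (seq.drop start).drop (PySem.Chars.find (seq.drop start) [kc]).toNat ∧
      ∀ i : Nat, 0 ≤ i → i < (PySem.Chars.find (seq.drop start) [kc]).toNat →
        ¬ [kc] <+: (seq.drop start).drop i := by
    intro h
    have := PySem.Chars.findFrom_natCast_spec (seq.drop start) [kc] 0 (Nat.zero_le _)
      (by rw [h0]; exact h)
    rw [h0] at this
    simpa using this
  constructor
  · rw [hM]
    split_ifs with hf
    · simp [hneg.mp hf]
    · obtain ⟨h0le, _, _⟩ := spec0 hf
      constructor
      · intro habs
        exfalso
        omega
      · intro hnm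
        exact absurd (hneg.mpr hnm) hf
  · intro h
    rw [hM] at h ⊢
    have hf : PySem.Chars.find (seq.drop start) [kc] ≠ -1 := by
      intro hf
      rw [if_pos hf] at h
      exact h rfl
    rw [if_neg hf] at h ⊢
    obtain ⟨h0le, hpre, hmin⟩ := spec0 hf
    have hsome : (seq.drop start)[(PySem.Chars.find (seq.drop start) [kc]).toNat]? = some kc := by
      rw [← List.head?_drop]
      exact (pv_singleton_prefix _ _).mp hpre
    have hlen := pv_takeWhile_len kc (seq.drop start) (PySem.Chars.find (seq.drop start) [kc]).toNat
      hsome (fun i hi hsomei => hmin i (Nat.zero_le _) hi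
        ((pv_singleton_prefix _ _).mpr (by rw [List.head?_drop]; exact hsomei)))
    rw [hlen]
    omega

theorem pv_isIn_space (l : List Char) :
    (if PySem.Chars.isIn [' '] l then [' '] else ([] : List Char)) = pvLead l := by
  have h0 : PySem.Chars.findFrom l [' '] ((0 : Nat) : Int) none = PySem.Chars.find l [' '] := by
    rw [Nat.cast_zero]
    exact PySem.Chars.findFrom_zero l [' ']
  have hneg : PySem.Chars.find l [' '] = -1 ↔ ' ' ∉ l := by
    rw [← h0]
    rw [PySem.Chars.findFrom_natCast_eq_neg_one_iff l [' '] 0 (Nat.zero_le _)]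
    simp [pv_singleton_infix]
  unfold PySem.Chars.isIn pvLead
  by_cases hm : ' ' ∈ l
  · rw [if_pos hm, if_pos (by simp only [bne_iff_ne, ne_eq]; exact fun h => (hneg.mp h) hm)]
  · rw [if_neg hm, if_neg (by simp [hneg.mpr hm])]

-- the matched char is not an element of its takeWhile block
theorem pv_tw_not_mem (s : List Char) (kc : Char) :
    kc ∉ s.takeWhile (fun c => decide (c ≠ kc)) := by
  intro h
  have := List.mem_takeWhile_imp h
  simp at this

-- B's two passes produce pvSpec up to one trailing space
theorem pv_emit_spec (seq : List Char) : ∀ (keep : List Char), ' ' ∉ keep →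
    ∀ (q : Nat), q + 1 ≤ seq.length →
      ∃ t, (t = [] ∨ t = [' ']) ∧
        pvSpec keep (seq.drop (q + 1)) =
          pvEmit seq (some q) (pvMatches seq keep (q + 1)) ++ t := by
  intro keep
  induction keep with
  | nil =>
    intro _ q hq
    refine ⟨pvLead (seq.drop (q + 1)), ?_, by simp [pvSpec, pvMatches, pvEmit]⟩
    by_cases h : ' ' ∈ seq.drop (q + 1) <;> simp [pvLead, h]
  | cons kc rest ih =>
    intro hk q hq
    have hk' : ' ' ∉ rest := fun h => hk (List.mem_cons_of_mem _ h)
    obtain ⟨hneg_iff, hpos⟩ := pv_find_char seq kc (q + 1) hq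
    by_cases hmem : kc ∈ seq.drop (q + 1)
    · -- found
      have hf : PySem.Chars.findFrom seq [kc] ((q + 1 : Nat) : Int) none ≠ -1 :=
        fun h => (hneg_iff.mp h) hmem
      have htn := hpos hf
      set s' := seq.drop (q + 1) with hs'
      set a := s'.takeWhile (fun c => decide (c ≠ kc)) with ha
      have hkcna : kc ∉ a := by rw [ha]; exact pv_tw_not_mem s' kc
      have hfound : ¬ a.length = s'.length := by
        intro hle
        have heq : a = s' := (List.takeWhile_prefix _).eq_of_length hle
        rw [← heq] at hmem
        exact hkcna hmem
      cases hdw : s'.dropWhile (fun c => decide (c ≠ kc)) with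
      | nil =>
        exfalso
        have := List.dropWhile_eq_nil_iff.mp hdw kc hmem
        simp at this
      | cons x xs =>
        have hx : x = kc := by simpa using pv_dropWhile_head _ s' x xs hdw
        have hsplit : s' = a ++ kc :: xs := by
          conv_lhs => rw [← List.takeWhile_append_dropWhile (p := fun c => decide (c ≠ kc)) (l := s')]
          rw [hdw, hx, ← ha]
        have hbdrop : s'.drop (a.length + 1) = xs := by
          have h3 := pv_drop_split a xs kc
          rw [← hsplit] at h3
          exact h3
        have hlen2 := congrArg List.length hsplit
        simp at hlen2
        have hlen1 : s'.length = seq.length - (q + 1) := by rw [hs']; simp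
        have hplen : (PySem.Chars.findFrom seq [kc] ((q + 1 : Nat) : Int) none).toNat + 1 ≤ seq.length := by
          omega
        obtain ⟨t, htt, hrec⟩ :=
          ih hk' (PySem.Chars.findFrom seq [kc] ((q + 1 : Nat) : Int) none).toNat hplen
        have hdd : seq.drop ((PySem.Chars.findFrom seq [kc] ((q + 1 : Nat) : Int) none).toNat + 1) = xs := by
          rw [htn, ← hbdrop, hs', List.drop_drop]
          congr 1
        rw [hdd] at hrec
        have hslice : PySem.List.slice seq (some ((q + 1 : Nat) : Int))
            (some (((PySem.Chars.findFrom seq [kc] ((q + 1 : Nat) : Int) none).toNat : Nat) : Int)) = a := by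
          rw [PySem.List.slice_natCast, htn]
          have h1 : q + 1 + a.length - (q + 1) = a.length := by omega
          rw [h1, ← hs']
          exact (List.prefix_iff_eq_take.mp (List.takeWhile_prefix _)).symm
        refine ⟨t, htt, ?_⟩
        rw [pvSpec, if_neg (by rw [← ha]; exact hfound)]
        rw [← ha, hbdrop]
        have hMeq : pvMatches seq (kc :: rest) (q + 1) =
            ((PySem.Chars.findFrom seq [kc] ((q + 1 : Nat) : Int) none).toNat, kc) ::
              pvMatches seq rest ((PySem.Chars.findFrom seq [kc] ((q + 1 : Nat) : Int) none).toNat + 1) := by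
          rw [pvMatches, if_neg hf]
        rw [hMeq, pvEmit_cons_some, hslice, pv_isIn_space, hrec]
        simp [List.append_assoc]
    · -- not found: matches empty, whole remainder is the trailing block
      have hf : PySem.Chars.findFrom seq [kc] ((q + 1 : Nat) : Int) none = -1 := hneg_iff.mpr hmem
      have hself : (seq.drop (q + 1)).takeWhile (fun c => decide (c ≠ kc)) = seq.drop (q + 1) := by
        have hdw : (seq.drop (q + 1)).dropWhile (fun c => decide (c ≠ kc)) = [] :=
          List.dropWhile_eq_nil_iff.mpr (fun x hx => by
            simp only [decide_eq_true_iff]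
            intro hxe
            exact hmem (hxe ▸ hx))
        have h2 := List.takeWhile_append_dropWhile
          (p := fun c => decide (c ≠ kc)) (l := seq.drop (q + 1))
        rw [hdw, List.append_nil] at h2
        exact h2
      refine ⟨pvLead (seq.drop (q + 1)), ?_, ?_⟩
      · by_cases h : ' ' ∈ seq.drop (q + 1) <;> simp [pvLead, h]
      · rw [pvSpec, if_pos (by rw [hself])]
        have hM0 : pvMatches seq (kc :: rest) (q + 1) = [] := by
          rw [pvMatches, if_pos hf]
        rw [hM0]
        simp [pvEmit]

-- top level: the leading block also drops out (pvEmit with prev = none emits no separator)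
theorem pv_emit_spec_top (seq : List Char) (keep : List Char) (hk : ' ' ∉ keep) :
    ∃ l t, (l = [] ∨ l = [' ']) ∧ (t = [] ∨ t = [' ']) ∧
      pvSpec keep seq = l ++ (pvEmit seq none (pvMatches seq keep 0) ++ t) := by
  cases keep with
  | nil =>
    refine ⟨pvLead seq, [], ?_, Or.inl rfl, by simp [pvSpec, pvMatches, pvEmit]⟩
    by_cases h : ' ' ∈ seq <;> simp [pvLead, h]
  | cons kc rest =>
    have hk' : ' ' ∉ rest := fun h => hk (List.mem_cons_of_mem _ h)
    obtain ⟨hneg_iff, hpos⟩ := pv_find_char seq kc 0 (Nat.zero_le _)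
    simp only [List.drop_zero] at hneg_iff hpos
    by_cases hmem : kc ∈ seq
    · have hf : PySem.Chars.findFrom seq [kc] ((0 : Nat) : Int) none ≠ -1 :=
        fun h => (hneg_iff.mp h) hmem
      have htn := hpos hf
      simp only [Nat.zero_add] at htn
      set a := seq.takeWhile (fun c => decide (c ≠ kc)) with ha
      have hkcna : kc ∉ a := by rw [ha]; exact pv_tw_not_mem seq kc
      have hfound : ¬ a.length = seq.length := by
        intro hle
        have heq : a = seq := (List.takeWhile_prefix _).eq_of_length hle
        rw [← heq] at hmem
        exact hkcna hmem
      cases hdw : seq.dropWhile (fun c => decide (c ≠ kc)) with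
      | nil =>
        exfalso
        have := List.dropWhile_eq_nil_iff.mp hdw kc hmem
        simp at this
      | cons x xs =>
        have hx : x = kc := by simpa using pv_dropWhile_head _ seq x xs hdw
        have hsplit : seq = a ++ kc :: xs := by
          conv_lhs => rw [← List.takeWhile_append_dropWhile (p := fun c => decide (c ≠ kc)) (l := seq)]
          rw [hdw, hx, ← ha]
        have hbdrop : seq.drop (a.length + 1) = xs := by
          have h3 := pv_drop_split a xs kc
          rw [← hsplit] at h3
          exact h3
        have hlen2 := congrArg List.length hsplit
        simp at hlen2
        have hplen : (PySem.Chars.findFrom seq [kc] ((0 : Nat) : Int) none).toNat + 1 ≤ seq.length := by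
          omega
        obtain ⟨t, htt, hrec⟩ :=
          pv_emit_spec seq rest hk' (PySem.Chars.findFrom seq [kc] ((0 : Nat) : Int) none).toNat hplen
        have hdd : seq.drop ((PySem.Chars.findFrom seq [kc] ((0 : Nat) : Int) none).toNat + 1) = xs := by
          rw [htn, hbdrop]
        rw [hdd] at hrec
        refine ⟨pvLead a, t, ?_, htt, ?_⟩
        · by_cases h : ' ' ∈ a <;> simp [pvLead, h]
        · rw [pvSpec, if_neg (by rw [← ha]; exact hfound)]
          rw [← ha, hbdrop]
          have hMeq : pvMatches seq (kc :: rest) 0 =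
              ((PySem.Chars.findFrom seq [kc] ((0 : Nat) : Int) none).toNat, kc) ::
                pvMatches seq rest ((PySem.Chars.findFrom seq [kc] ((0 : Nat) : Int) none).toNat + 1) := by
            rw [pvMatches, if_neg hf]
          rw [hMeq, pvEmit_cons_none, hrec]
          simp [List.append_assoc]
    · have hf : PySem.Chars.findFrom seq [kc] ((0 : Nat) : Int) none = -1 := hneg_iff.mpr hmem
      have hself : seq.takeWhile (fun c => decide (c ≠ kc)) = seq := by
        have hdw : seq.dropWhile (fun c => decide (c ≠ kc)) = [] :=
          List.dropWhile_eq_nil_iff.mpr (fun x hx => by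
            simp only [decide_eq_true_iff]
            intro hxe
            exact hmem (hxe ▸ hx))
        have h2 := List.takeWhile_append_dropWhile (p := fun c => decide (c ≠ kc)) (l := seq)
        rw [hdw, List.append_nil] at h2
        exact h2
      refine ⟨pvLead seq, [], ?_, Or.inl rfl, ?_⟩
      · by_cases h : ' ' ∈ seq <;> simp [pvLead, h]
      · rw [pvSpec, if_pos (by rw [hself])]
        have hM0 : pvMatches seq (kc :: rest) 0 = [] := by
          rw [pvMatches, if_pos hf]
        rw [hM0]
        simp [pvEmit]

-- strip ignores an all-whitespace suffix / prefix
theorem pv_rstrip_ws (x t : List Char) (ht : ∀ c ∈ t, PySem.Chars.isspace c = true) :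
    PySem.Chars.rstrip (x ++ t) = PySem.Chars.rstrip x := by
  unfold PySem.Chars.rstrip
  rw [List.reverse_append, List.dropWhile_append]
  have h1 : t.reverse.dropWhile PySem.Chars.isspace = [] :=
    List.dropWhile_eq_nil_iff.mpr (fun c hc => ht c (List.mem_reverse.mp hc))
  rw [h1]
  simp

theorem pv_strip_ws_append (l m : List Char) (hl : ∀ c ∈ l, PySem.Chars.isspace c = true) :
    PySem.Chars.strip (l ++ m) = PySem.Chars.strip m := by
  unfold PySem.Chars.strip PySem.Chars.lstrip
  rw [List.dropWhile_append]
  have h1 : l.dropWhile PySem.Chars.isspace = [] := List.dropWhile_eq_nil_iff.mpr hl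
  rw [h1]
  simp

theorem pv_strip_append_ws (m t : List Char) (ht : ∀ c ∈ t, PySem.Chars.isspace c = true) :
    PySem.Chars.strip (m ++ t) = PySem.Chars.strip m := by
  unfold PySem.Chars.strip PySem.Chars.lstrip
  rw [List.dropWhile_append]
  by_cases he : (m.dropWhile PySem.Chars.isspace).isEmpty
  · rw [if_pos he]
    rw [List.isEmpty_iff.mp he]
    have h1 : t.dropWhile PySem.Chars.isspace = [] := List.dropWhile_eq_nil_iff.mpr ht
    rw [h1]
  · rw [if_neg he]
    exact pv_rstrip_ws _ _ ht

theorem pv_ws_of_opt (l : List Char) (h : l = [] ∨ l = [' ']) :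
    ∀ c ∈ l, PySem.Chars.isspace c = true := by
  rcases h with h | h <;> subst h <;> intro c hc
  · simp at hc
  · simp at hc
    subst hc
    decide

-- ===== VERDICT (by name: the statement is the Claim_ definition above) =====
theorem remove_additional_chars_spec : Claim_equal_remove_additional_chars := by
  intro sequence correct _
  have hk : ' ' ∉ correct.toList.filter (fun c => c != ' ') := by
    simp [List.mem_filter]
  have hA := pv_foldA_spec _ hk sequence.toList [] (by simp)
  obtain ⟨l, t, hl, ht, hspec⟩ := pv_emit_spec_top sequence.toList _ hk
  show PySem.Str.strip (String.ofList
      (sequence.toList.foldl (pvStepA (correct.toList.filter (fun c => c != ' '))) ([], 0)).1) =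
    PySem.Str.strip (String.ofList
      (pvEmit sequence.toList none
        (pvMatches sequence.toList (correct.toList.filter (fun c => c != ' ')) 0)))
  rw [hA, List.nil_append, hspec]
  unfold PySem.Str.strip
  rw [String.toList_ofList, String.toList_ofList]
  rw [pv_strip_ws_append _ _ (pv_ws_of_opt l hl), pv_strip_append_ws _ _ (pv_ws_of_opt t ht)]
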